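-- pv_equiv track=rewrite | github.com/mwkmwkmwk/dynamite | veles/deco/ir.py | const_cuts
-- ===== SOURCE A (Python) =====
-- def const_cuts(width, val):
--     res = set()
--     pos = 0
--     pv = val & 1
--     while pos < width:
--         cv = val >> pos & 1
--         if cv != pv:
--             res.add(pos)
--         pos += 1
--         pv = cv
--     return res
-- ===== SOURCE B (Python) =====
-- def const_cuts(width, val):
--     # Transition mask: bit p of (val ^ (val >> 1)) says bits p and p+1 of val differ.
--     # Mask to the width-1 relevant transitions, then scan only the mask's bits.
--     if width <= 1:
--         return set()
--     t = (val ^ (val >> 1)) & ((1 << (width - 1)) - 1)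
--     res = set()
--     pos = 1
--     while t:
--         if t & 1:
--             res.add(pos)
--         t >>= 1
--         pos += 1
--     return res
-- ===== Notes on version B (the rewrite author's own statement) =====
-- stated objective: faster
-- what changed: Instead of scanning all width bit positions while threading the previous bit, B computes the transition mask (val ^ (val >> 1)) & ((1 << (width-1)) - 1) in one step and only scans the bits of that mask, whose length is bounded by val's bit length, not by width.
import Mathlib
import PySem

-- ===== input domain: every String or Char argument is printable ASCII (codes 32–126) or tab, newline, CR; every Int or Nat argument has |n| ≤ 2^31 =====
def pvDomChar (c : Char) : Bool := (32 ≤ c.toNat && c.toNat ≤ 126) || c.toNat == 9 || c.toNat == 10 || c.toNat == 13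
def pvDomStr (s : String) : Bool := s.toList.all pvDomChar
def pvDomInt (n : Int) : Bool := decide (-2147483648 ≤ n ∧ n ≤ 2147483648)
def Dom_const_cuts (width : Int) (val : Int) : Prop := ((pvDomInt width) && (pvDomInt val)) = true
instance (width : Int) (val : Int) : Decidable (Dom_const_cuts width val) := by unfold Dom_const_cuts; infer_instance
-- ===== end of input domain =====

-- B replaces A's position-by-position scan of all `width` bits by a single XOR transition
-- mask whose bits are then scanned; proof: both equal the filtered list of transition positions.

-- ===== PORT A =====
-- while pos < width: runs width.toNat iterations, pos starting at 0 and increasing by 1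
def constCutsLoop (val : Int) : Nat → Int → Int → List Int → List Int
  | 0, _, _, res => res
  | n + 1, pos, pv, res =>
      let cv := PySem.Int.band (val >>> pos.toNat) 1   -- val >> pos & 1  (pos ≥ 0 throughout)
      constCutsLoop val n (pos + 1) cv (if cv ≠ pv then PySem.Set.add res pos else res)

def const_cuts (width : Int) (val : Int) : List Int :=
  constCutsLoop val width.toNat 0 (PySem.Int.band val 1) []

-- ===== PORT B =====
-- while t: scan the bits of t; t is a nonnegative Python int (it is masked by a
-- nonnegative mask), held here as a Nat
def constCutsAltLoop (t : Nat) (pos : Int) (res : List Int) : List Int :=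
  if t = 0 then res
  else constCutsAltLoop (t >>> 1) (pos + 1) (if t &&& 1 = 1 then PySem.Set.add res pos else res)
termination_by t
decreasing_by simp [Nat.shiftRight_eq_div_pow, pow_one]; omega

def const_cuts_alt (width : Int) (val : Int) : List Int :=
  if width ≤ 1 then []
  else
    constCutsAltLoop
      ((PySem.Int.band (PySem.Int.bxor val (val >>> (1:Nat)))
        ((((1:Nat) <<< (width - 1).toNat : Nat) : Int) - 1)).toNat)
      1 []

-- ===== PRECONDITION & SPEC =====
def Spec_const_cuts (width : Int) (val : Int) (out : List Int) : Prop := out = const_cuts_alt width val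
instance (width : Int) (val : Int) (out : List Int) : Decidable (Spec_const_cuts width val out) := by unfold Spec_const_cuts; infer_instance

-- ===== CLAIM (what is proved, stated in full; the proofs are below) =====
def Claim_equal_const_cuts : Prop := ∀ (width : Int) (val : Int), Dom_const_cuts width val → Spec_const_cuts width val (const_cuts width val)

-- ===== LEMMAS AND PROOFS =====

-- bit pos of val, as Python's `val >> pos & 1` computes it (an Int, 0 or 1)
def cbit (v : Int) (k : Nat) : Int := PySem.Int.band (v >>> k) 1

-- the Nat whose bits are val's bits (complemented, if val < 0)
def nrep (v : Int) : Nat := if 0 ≤ v then v.toNat else (-v - 1).toNat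

lemma set_add_of_lt {res : List Int} {p : Int} (h : ∀ x ∈ res, x < p) :
    PySem.Set.add res p = res ++ [p] := by
  have hc : res.contains p = false := by
    rcases hc : res.contains p with _ | _
    · rfl
    · exact absurd (lt_irrefl p) (by simpa using h p (List.contains_iff_mem.mp hc))
  show (if res.contains p = true then res else res ++ [p]) = res ++ [p]
  rw [hc]
  simp

lemma testBit_eq_decide (x i : Nat) : x.testBit i = decide ((x >>> i) % 2 = 1) := by
  rcases Nat.mod_two_eq_zero_or_one (x >>> i) with h | h <;>
    simp [Nat.testBit, Nat.and_comm 1, Nat.and_one_is_mod, h]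

-- Int arithmetic shift vs Nat shift
lemma shift_toNat (v : Int) (hv : 0 ≤ v) (k : Nat) : v >>> k = ((v.toNat >>> k : Nat) : Int) := by
  obtain ⟨a, rfl⟩ := Int.eq_ofNat_of_zero_le hv
  rw [Int.shiftRight_eq_div_pow, Nat.shiftRight_eq_div_pow]
  simp only [Int.toNat_natCast]
  push_cast
  ring

lemma shift_neg (v : Int) (hv : v < 0) (k : Nat) :
    v >>> k = -((nrep v >>> k : Nat) : Int) - 1 := by
  rw [Int.shiftRight_eq_div_pow, Nat.shiftRight_eq_div_pow]
  have hpow : 0 < 2 ^ k := Nat.two_pow_pos k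
  have hn : (nrep v : Int) = -v - 1 := by simp [nrep]; omega
  set N := 2 ^ k with hNdef
  set q := nrep v / N with hqdef
  set r := nrep v % N with hrdef
  have hqr : N * q + r = nrep v := Nat.div_add_mod (nrep v) N
  have hm : r < N := Nat.mod_lt _ hpow
  have hprod : (N : Int) * (-(q : Int) - 1) = -((N * q : Nat) : Int) - (N : Int) := by
    push_cast; ring
  have h2 : (N : Int) * (q : Int) + (r : Int) = ((nrep v : Nat) : Int) := by exact_mod_cast hqr
  have h1 : ((N - 1 - r : Nat) : Int) = (N : Int) - 1 - (r : Int) := by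
    rw [Nat.cast_sub (by omega : r ≤ N - 1), Nat.cast_sub (by omega : 1 ≤ N)]
    norm_num
  have : v / ((N : Nat) : Int) = -((q : Nat) : Int) - 1 := by
    have h := (Int.ediv_emod_unique (a := v) (b := ((N : Nat) : Int))
      (q := -((q : Nat) : Int) - 1) (r := ((N - 1 - r : Nat) : Int))
      (by exact_mod_cast hpow)).mpr
      ⟨by rw [h1]; linear_combination - h2 - hn,
       by rw [h1]; omega,
       by exact_mod_cast (show N - 1 - r < N by omega)⟩
    exact h.1
  exact_mod_cast this

lemma cbit_eq (v : Int) (k : Nat) :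
    cbit v k = if 0 ≤ v then ((nrep v >>> k) % 2 : Nat) else 1 - ((nrep v >>> k) % 2 : Nat) := by
  rw [cbit, PySem.Int.band_one]
  have hmod : ∀ a : Int, PySem.Int.mod a 2 = a % 2 := by
    intro a; simp [PySem.Int.mod, Int.fmod_eq_emod]
  rcases (by omega : 0 ≤ v ∨ v < 0) with hv | hv
  · rw [hmod, shift_toNat v hv k, if_pos hv]
    simp only [nrep, if_pos hv]
    omega
  · rw [hmod, shift_neg v hv k, if_neg (by omega)]
    have := Nat.mod_two_eq_zero_or_one (nrep v >>> k)
    omega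

lemma cbit_ne_iff (v : Int) (k k' : Nat) :
    (cbit v k ≠ cbit v k') ↔ ((nrep v).testBit k ≠ (nrep v).testBit k') := by
  rw [cbit_eq, cbit_eq, testBit_eq_decide, testBit_eq_decide]
  have h1 := Nat.mod_two_eq_zero_or_one (nrep v >>> k)
  have h2 := Nat.mod_two_eq_zero_or_one (nrep v >>> k')
  rcases h1 with h1 | h1 <;> rcases h2 with h2 | h2 <;>
    rcases (by omega : 0 ≤ v ∨ v < 0) with hv | hv <;>
      simp [h1, h2, hv] <;> omega

-- the filter predicate: position p is a cut
def cutP (v : Int) (p : Nat) : Bool := decide (0 < p) && decide (cbit v p ≠ cbit v (p - 1))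

-- A's loop unfolding (one iteration)
lemma loop_unfold (v : Int) (n : Nat) (pos pv : Int) (res : List Int) :
    constCutsLoop v (n + 1) pos pv res
      = constCutsLoop v n (pos + 1) (PySem.Int.band (v >>> pos.toNat) 1)
          (if PySem.Int.band (v >>> pos.toNat) 1 ≠ pv then PySem.Set.add res pos else res) := rfl

-- A's loop produces the cut positions of [k, k+n), given pv = bit (k-1) and res below k
lemma loopA_eq (v : Int) : ∀ (n k : Nat) (res : List Int), (∀ x ∈ res, x < (k : Int)) →
    constCutsLoop v n (k : Int) (cbit v (k - 1)) res
      = res ++ ((List.range' k n).filter (cutP v)).map (fun p : Nat => (p : Int)) := by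
  intro n
  induction n with
  | zero => intro k res _; simp [constCutsLoop]
  | succ n ih =>
    intro k res hres
    rw [List.range'_succ, loop_unfold]
    rcases Nat.eq_zero_or_pos k with hk | hk
    · subst hk
      rw [if_neg (by simp [cbit])]
      have ihk := ih 1 res (fun x hx => by have := hres x hx; omega)
      rw [show (1 : Nat) - 1 = 0 from rfl] at ihk
      rw [show (((0:Nat) : Int)) + 1 = (((1:Nat)) : Int) by norm_num,
        show PySem.Int.band (v >>> ((((0:Nat)) : Int)).toNat) 1 = cbit v 0 from rfl, ihk,
        List.filter_cons, show cutP v 0 = false by simp [cutP]]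
      simp
    · obtain ⟨j, rfl⟩ : ∃ j, k = j + 1 := ⟨k - 1, by omega⟩
      have htn : (((j + 1 : Nat) : Int)).toNat = j + 1 := by omega
      rw [show PySem.Int.band (v >>> ((((j + 1 : Nat)) : Int)).toNat) 1 = cbit v (j + 1) by
        rw [htn]; rfl]
      have hcast : (((j + 1 : Nat)) : Int) + 1 = (((j + 2 : Nat)) : Int) := by push_cast; ring
      by_cases hne : cbit v (j + 1) ≠ cbit v ((j + 1) - 1)
      · rw [if_pos hne, set_add_of_lt hres, hcast]
        have ihk := ih (j + 2) (res ++ [((j + 1 : Nat) : Int)]) (by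
          intro x hx; simp at hx
          rcases hx with hx | hx
          · have := hres x hx; push_cast at *; omega
          · subst hx; push_cast; omega)
        rw [show (j + 2) - 1 = j + 1 from rfl] at ihk
        rw [ihk, List.filter_cons, show cutP v (j + 1) = true by
          simp only [cutP, Bool.and_eq_true, decide_eq_true_eq]
          exact ⟨by omega, hne⟩]
        simp
      · rw [if_neg hne, hcast]
        have ihk := ih (j + 2) res (fun x hx => by have := hres x hx; push_cast at *; omega)
        rw [show (j + 2) - 1 = j + 1 from rfl] at ihk
        rw [ihk, List.filter_cons, show cutP v (j + 1) = false by
          simp only [cutP, Bool.and_eq_false_iff, decide_eq_false_iff_not]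
          right; simpa using hne]
        simp

-- B's loop, bounded: t < 2^b, produces k + (set-bit positions of t)
lemma loopB_eq : ∀ (b t : Nat) (k : Nat) (res : List Int), t < 2 ^ b → (∀ x ∈ res, x < (k : Int)) →
    constCutsAltLoop t (k : Int) res
      = res ++ ((List.range b).filter t.testBit).map (fun i => ((k + i : Nat) : Int)) := by
  intro b
  induction b with
  | zero => intro t k res ht _; interval_cases t; simp [constCutsAltLoop]
  | succ b ih =>
    intro t k res ht hres
    rcases Nat.eq_zero_or_pos t with h0 | h0
    · subst h0
      rw [constCutsAltLoop]
      simp [Nat.zero_testBit]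
    · rw [constCutsAltLoop, if_neg (by omega)]
      have hdiv : t >>> 1 = t / 2 := by rw [Nat.shiftRight_eq_div_pow, pow_one]
      have hlt2 : t / 2 < 2 ^ b := by
        have : (2:Nat) ^ (b + 1) = 2 * 2 ^ b := by ring
        omega
      have hcast : (k : Int) + 1 = ((k + 1 : Nat) : Int) := by push_cast; ring
      have hbit0 : (t &&& 1 = 1) ↔ t.testBit 0 = true := by
        rw [Nat.and_one_is_mod, Nat.testBit_zero]
        simp
      have hfun : t.testBit ∘ Nat.succ = (t / 2).testBit :=
        funext fun i => by simp [Function.comp, Nat.testBit_succ]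
      have hmap : ∀ l : List Nat,
          (l.filter ((t / 2).testBit)).map ((fun i => ((k + i : Nat) : Int)) ∘ Nat.succ)
            = (l.filter ((t / 2).testBit)).map (fun i => ((k + 1 + i : Nat) : Int)) :=
        fun l => List.map_congr_left (fun i _ => by
          simp only [Function.comp_apply]
          exact congrArg _ (by omega))
      rw [List.range_succ_eq_map, List.filter_cons]
      by_cases hb : t.testBit 0 = true
      · rw [if_pos ((hbit0).mpr hb), set_add_of_lt hres, hcast, hdiv,
          ih (t / 2) (k + 1) (res ++ [(k : Int)])
            hlt2 (by intro x hx; simp at hx; rcases hx with hx | hx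
                     · have := hres x hx; push_cast at *; omega
                     · subst hx; push_cast; omega)]
        rw [hb]
        simp only [if_true, List.filter_map, List.map_map, List.map_cons, List.append_assoc,
          List.cons_append, List.nil_append, hfun, hmap, Nat.add_zero]
      · have hb' : t.testBit 0 = false := by simpa using hb
        rw [if_neg (by rw [hbit0]; exact hb), hcast, hdiv,
          ih (t / 2) (k + 1) res hlt2
            (by intro x hx; have := hres x hx; push_cast at *; omega)]
        rw [hb']
        simp only [Bool.false_eq_true, if_false, List.filter_map, List.map_map, hfun, hmap]

-- the masked xor value of B, as a Nat expression over nrep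
lemma tmask_eq (v : Int) (m : Nat) :
    (PySem.Int.band (PySem.Int.bxor v (v >>> (1:Nat))) (((((1:Nat) <<< m : Nat)) : Int) - 1)).toNat
      = (nrep v ^^^ (nrep v >>> 1)) &&& (2 ^ m - 1) := by
  have hmask : ((((1:Nat) <<< m : Nat)) : Int) - 1 = ((2 ^ m - 1 : Nat) : Int) := by
    rw [Nat.one_shiftLeft]
    have : (0:Nat) < 2 ^ m := Nat.two_pow_pos m
    push_cast [this]
    ring
  rcases (by omega : 0 ≤ v ∨ v < 0) with hv | hv
  · obtain ⟨a, rfl⟩ := Int.eq_ofNat_of_zero_le hv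
    have hn : nrep ((a : Nat) : Int) = a := by simp [nrep]
    rw [shift_toNat _ hv 1, Int.toNat_natCast, PySem.Int.bxor_natCast, hmask,
      PySem.Int.band_natCast, hn, Int.toNat_natCast]
  · have h1 : ¬ (0 ≤ v) := by omega
    have h2 : ¬ ((0:Int) ≤ -((nrep v >>> 1 : Nat) : Int) - 1) := by
      have : (0:Int) ≤ ((nrep v >>> 1 : Nat) : Int) := Int.natCast_nonneg _
      omega
    rw [shift_neg v hv 1, PySem.Int.bxor, if_neg h1, if_neg h2]
    have e1 : (-v - 1).toNat = nrep v := by rw [nrep, if_neg h1]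
    have e2 : (-(-((nrep v >>> 1 : Nat) : Int) - 1) - 1).toNat = nrep v >>> 1 := by omega
    rw [e1, e2, hmask, PySem.Int.band_natCast, Int.toNat_natCast]

-- bits of the transition mask
lemma tmask_testBit (v : Int) (m i : Nat) :
    ((nrep v ^^^ (nrep v >>> 1)) &&& (2 ^ m - 1)).testBit i
      = (decide ((nrep v).testBit (i + 1) ≠ (nrep v).testBit i) && decide (i < m)) := by
  rw [Nat.testBit_land, Nat.testBit_two_pow_sub_one, Nat.testBit_xor, Nat.testBit_shiftRight,
    Nat.add_comm 1 i]
  rcases hb1 : (nrep v).testBit i with _ | _ <;>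
    rcases hb2 : (nrep v).testBit (i + 1) with _ | _ <;> simp

-- A's closed form
lemma const_cuts_eq (w v : Int) :
    const_cuts w v = ((List.range w.toNat).filter (cutP v)).map (fun p : Nat => (p : Int)) := by
  have h0 : PySem.Int.band v 1 = cbit v 0 := by simp [cbit]
  have := loopA_eq v w.toNat 0 [] (by simp)
  simp only [Nat.cast_zero, Nat.zero_sub] at this
  rw [const_cuts, h0, show cbit v 0 = cbit v (0 - 1) by norm_num, this,
    List.range_eq_range']
  simp

-- B's closed form (width ≥ 2 case), with m = (w-1).toNat
lemma const_cuts_alt_eq (w v : Int) (hw : ¬ w ≤ 1) :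
    const_cuts_alt w v
      = ((List.range (w - 1).toNat).filter
            (fun i => decide ((nrep v).testBit (i + 1) ≠ (nrep v).testBit i))).map
          (fun i => ((1 + i : Nat) : Int)) := by
  rw [const_cuts_alt, if_neg hw]
  have ht := tmask_eq v (w - 1).toNat
  rw [ht]
  set m := (w - 1).toNat with hm
  set T := (nrep v ^^^ (nrep v >>> 1)) &&& (2 ^ m - 1) with hT
  have hTlt : T < 2 ^ m := by
    have h1 : T ≤ 2 ^ m - 1 := Nat.and_le_right
    have h2 : (0:Nat) < 2 ^ m := Nat.two_pow_pos m
    omega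
  have hloop := loopB_eq m T 1 [] hTlt (by simp)
  rw [show ((1:Nat) : Int) = (1:Int) from rfl] at hloop
  rw [hloop, List.nil_append]
  congr 1
  refine List.filter_congr ?_
  intro i hi
  rw [hT, tmask_testBit v m i]
  simp only [List.mem_range] at hi
  simp [hi]

-- ===== VERDICT (by name: the statement is the Claim_ definition above) =====
theorem const_cuts_spec : Claim_equal_const_cuts := by
  intro w v _
  unfold Spec_const_cuts
  rw [const_cuts_eq]
  by_cases hw : w ≤ 1
  · rw [const_cuts_alt, if_pos hw]
    have : w.toNat ≤ 1 := by omega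
    interval_cases h : w.toNat <;> simp [cutP]
  · rw [const_cuts_alt_eq w v hw]
    have hwn : w.toNat = (w - 1).toNat + 1 := by omega
    rw [hwn, List.range_succ_eq_map, List.filter_cons,
      show cutP v 0 = false by simp [cutP]]
    have hc1 : (List.map Nat.succ (List.range (w - 1).toNat)).filter (cutP v)
        = (List.map Nat.succ (List.range (w - 1).toNat)).filter
            (fun p => decide ((nrep v).testBit p ≠ (nrep v).testBit (p - 1))) := by
      refine List.filter_congr ?_
      intro p hp
      simp only [List.mem_map] at hp
      obtain ⟨i, _, rfl⟩ := hp
      show cutP v (i + 1) = decide ((nrep v).testBit (i + 1) ≠ (nrep v).testBit i)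
      simp only [cutP, Nat.add_sub_cancel]
      have := cbit_ne_iff v (i + 1) i
      by_cases hne : cbit v (i + 1) ≠ cbit v i
      · simp [hne, this.mp hne]
      · simp only [not_not] at hne
        simp [hne, (not_iff_not.mpr this).mp (by simp [hne])]
    rw [hc1, List.filter_map]
    have hc2 : (List.range (w - 1).toNat).filter
          ((fun p => decide ((nrep v).testBit p ≠ (nrep v).testBit (p - 1))) ∘ Nat.succ)
        = (List.range (w - 1).toNat).filter
            (fun i => decide ((nrep v).testBit (i + 1) ≠ (nrep v).testBit i)) := by
      refine List.filter_congr ?_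
      intro i _
      simp [Function.comp, Nat.succ_eq_add_one]
    rw [hc2]
    simp only [Bool.false_eq_true, if_false]
    rw [List.map_map]
    refine List.map_congr_left ?_
    intro i _
    simp only [Function.comp_apply]
    exact congrArg _ (by omega)
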